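-- pv_equiv track=rewrite | github.com/BCACTF/bcactf-6.0 | codebusting/solve.py | find_structure_matches
-- ===== SOURCE A (Python) =====
-- def create_structure_mask(text):
--     """Create a mask where letters are replaced with X but spaces and punctuation remain"""
--     return ''.join('X' if c.isalpha() else c for c in text)
--
-- def create_pattern_mask(text):
--     """Create a pattern mask where each unique letter is numbered"""
--     pattern = []
--     char_map = {}
--     next_id = 0
--
--     for char in text:
--         if char.isalpha():
--             if char not in char_map:
--                 char_map[char] = next_id
--                 next_id += 1
--             pattern.append(str(char_map[char]))
--         else:
--             pattern.append(char)
--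
--     return ''.join(pattern)
--
-- def find_structure_matches(ciphertext, quotes_list, strict=True):
--     """Find quotes that match the structure of spaces and punctuation"""
--     if not ciphertext.strip():
--         return []
--
--     cipher_mask = create_structure_mask(ciphertext)
--     cipher_pattern = create_pattern_mask(ciphertext)
--     cipher_len = len(ciphertext)
--
--     exact_matches = []
--     flexible_matches = []
--
--     for quote in quotes_list:
--         quote_upper = quote.upper()
--
--         # Skip if length difference is too large
--         if abs(len(quote_upper) - cipher_len) > (0 if strict else 3):
--             continue
--
--         # Create structure mask for quote
--         quote_mask = create_structure_mask(quote_upper)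
--
--         # Strict matching if lengths are equal
--         if len(quote_mask) == len(cipher_mask):
--             # Exact structure match
--             if quote_mask == cipher_mask:
--                 exact_matches.append(quote_upper)
--             # Flexible structure match - allow punctuation differences
--             elif sum(1 for a, b in zip(quote_mask, cipher_mask) if a != b) <= 3:
--                 flexible_matches.append(quote_upper)
--
--     # If we have exact matches, return those
--     if exact_matches:
--         return exact_matches
--
--     # If strict mode and no exact matches, return flexible matches if any
--     if strict and flexible_matches:
--         return flexible_matches
--
--     # If still no matches or in flexible mode, try letter frequency patterns
--     if not exact_matches and not flexible_matches or not strict: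
--         freq_matches = []
--         for quote in quotes_list:
--             quote_upper = quote.upper()
--
--             # Skip if length difference is too large
--             if abs(len(quote_upper) - cipher_len) > 5:
--                 continue
--
--             # Compare word count and structure pattern
--             cipher_words = len([w for w in ciphertext.split() if any(c.isalpha() for c in w)])
--             quote_words = len([w for w in quote_upper.split() if any(c.isalpha() for c in w)])
--
--             if abs(cipher_words - quote_words) <= 1:
--                 freq_matches.append(quote_upper)
--
--         return freq_matches[:10]  # Limit to top 10 frequency matches
--
--     return flexible_matches
-- ===== SOURCE B (Python) =====
-- def find_structure_matches(ciphertext, quotes_list, strict=True):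
--     """Single pass over quotes_list: classify each quote into exact/flexible
--     (comparing character classes directly, no mask strings) and into the
--     frequency-candidate list, then apply the same return cascade."""
--     if not ciphertext.strip():
--         return []
--
--     n = len(ciphertext)
--     cipher_words = sum(1 for w in ciphertext.split() if any(c.isalpha() for c in w))
--
--     exact, flexible, freq = [], [], []
--     for quote in quotes_list:
--         q = quote.upper()
--         if len(q) == n:
--             # positions whose structure masks would differ: the pair is a
--             # mismatch unless both chars are letters or the chars are equal
--             diffs = sum(1 for a, b in zip(q, ciphertext)
--                         if not ((a.isalpha() and b.isalpha()) or a == b))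
--             if diffs == 0:
--                 exact.append(q)
--             elif diffs <= 3:
--                 flexible.append(q)
--         if abs(len(q) - n) <= 5:
--             qw = sum(1 for w in q.split() if any(c.isalpha() for c in w))
--             if abs(cipher_words - qw) <= 1:
--                 freq.append(q)
--
--     if exact:
--         return exact
--     if strict and flexible:
--         return flexible
--     return freq[:10]
-- ===== Notes on version B (the rewrite author's own statement) =====
-- stated objective: simpler
-- what changed: B replaces A's two passes over quotes_list (plus per-quote mask-string construction and a dead pattern-mask computation) with a single pass that classifies each quote into exact/flexible by directly counting structurally mismatched character pairs (no mask strings built) and into the frequency list with the cipher word count hoisted out of the loop, then applies the same return cascade (the redundant length gate and A's unreachable trailing return are dropped).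
import Mathlib
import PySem

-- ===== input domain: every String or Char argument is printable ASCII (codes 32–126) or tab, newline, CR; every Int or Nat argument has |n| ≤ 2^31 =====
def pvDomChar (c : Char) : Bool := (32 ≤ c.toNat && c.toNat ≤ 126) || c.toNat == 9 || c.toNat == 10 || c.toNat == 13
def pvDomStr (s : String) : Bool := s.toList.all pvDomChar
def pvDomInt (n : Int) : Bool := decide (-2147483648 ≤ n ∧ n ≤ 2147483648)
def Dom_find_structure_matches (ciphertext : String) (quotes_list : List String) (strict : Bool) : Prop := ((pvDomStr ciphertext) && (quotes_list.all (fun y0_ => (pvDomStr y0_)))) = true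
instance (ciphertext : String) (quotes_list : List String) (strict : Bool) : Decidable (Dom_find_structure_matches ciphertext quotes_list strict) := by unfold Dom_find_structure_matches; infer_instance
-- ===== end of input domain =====

-- B makes a single pass over quotes_list, classifying each quote into the exact/flexible/
-- frequency lists by comparing character classes directly (no mask strings, dead pattern-mask
-- work dropped), then applies the same return cascade; simpler and measurably faster (constant factor).

-- ===== PORT A =====
def create_structure_mask (cs : List Char) : List Char :=
  cs.map (fun c => if PySem.Chars.isalpha c then 'X' else c)

def create_pattern_mask (cs : List Char) : List Char :=
  (cs.foldl (fun (st : List (List Char) × PySem.Dict Char Int × Int) char =>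
      if PySem.Chars.isalpha char then
        let cm := if st.2.1.contains char then st.2.1 else st.2.1.insert char st.2.2
        let ni := if st.2.1.contains char then st.2.2 else st.2.2 + 1
        (st.1 ++ [PySem.Int.toChars (cm.getD char 0)], cm, ni)
      else
        (st.1 ++ [[char]], st.2.1, st.2.2))
    ([], PySem.Dict.empty, 0)).1.flatten

-- the body of A's first for-loop (exact/flexible classification)
def fsmStepA (cipher_mask : List Char) (cipher_len : Nat) (strict : Bool)
    (acc : List String × List String) (quote : String) : List String × List String :=
  let quote_upper := PySem.Chars.upper quote.toList
  if (if strict then (0 : Int) else 3) < |(quote_upper.length : Int) - (cipher_len : Int)| then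
    acc
  else
    let quote_mask := create_structure_mask quote_upper
    if quote_mask.length = cipher_mask.length then
      if quote_mask = cipher_mask then (acc.1 ++ [String.ofList quote_upper], acc.2)
      else if (quote_mask.zip cipher_mask).countP (fun p => p.1 != p.2) ≤ 3 then
        (acc.1, acc.2 ++ [String.ofList quote_upper])
      else acc
    else acc

-- the body of A's second for-loop (letter-frequency candidates)
def fsmStepFreq (ciphertext : List Char) (cipher_len : Nat)
    (acc : List String) (quote : String) : List String :=
  let quote_upper := PySem.Chars.upper quote.toList
  if (5 : Int) < |(quote_upper.length : Int) - (cipher_len : Int)| then acc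
  else
    let cipher_words := ((PySem.Chars.split₀ ciphertext).filter
        (fun w => w.any PySem.Chars.isalpha)).length
    let quote_words := ((PySem.Chars.split₀ quote_upper).filter
        (fun w => w.any PySem.Chars.isalpha)).length
    if |(cipher_words : Int) - (quote_words : Int)| ≤ 1 then acc ++ [String.ofList quote_upper]
    else acc

def find_structure_matches (ciphertext : String) (quotes_list : List String) (strict : Bool) : List String :=
  let cs := ciphertext.toList
  if PySem.Chars.strip cs = [] then []
  else
    let cipher_mask := create_structure_mask cs
    let _cipher_pattern := create_pattern_mask cs
    let cipher_len := cs.length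
    let ef := quotes_list.foldl (fsmStepA cipher_mask cipher_len strict) ([], [])
    if ef.1 ≠ [] then ef.1
    else if strict = true ∧ ef.2 ≠ [] then ef.2
    else if (ef.1 = [] ∧ ef.2 = []) ∨ strict = false then
      (quotes_list.foldl (fsmStepFreq cs cipher_len) []).take 10
    else ef.2

-- ===== PORT B =====
-- mismatch count of Source B: pairs that are neither both letters nor equal characters
def fsmDiffCount (qu ct : List Char) : Nat :=
  (qu.zip ct).countP (fun p => !((PySem.Chars.isalpha p.1 && PySem.Chars.isalpha p.2) || p.1 == p.2))

-- the body of B's single for-loop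
def fsmStepB (ciphertext : List Char) (n : Nat) (cipher_words : Nat)
    (acc : List String × List String × List String) (quote : String) :
    List String × List String × List String :=
  let q := PySem.Chars.upper quote.toList
  let acc :=
    if q.length = n then
      let diffs := fsmDiffCount q ciphertext
      if diffs = 0 then (acc.1 ++ [String.ofList q], acc.2.1, acc.2.2)
      else if diffs ≤ 3 then (acc.1, acc.2.1 ++ [String.ofList q], acc.2.2)
      else acc
    else acc
  if |(q.length : Int) - (n : Int)| ≤ 5 then
    let qw := (PySem.Chars.split₀ q).countP (fun w => w.any PySem.Chars.isalpha)
    if |(cipher_words : Int) - (qw : Int)| ≤ 1 then (acc.1, acc.2.1, acc.2.2 ++ [String.ofList q])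
    else acc
  else acc

def find_structure_matches_alt (ciphertext : String) (quotes_list : List String) (strict : Bool) : List String :=
  let cs := ciphertext.toList
  if PySem.Chars.strip cs = [] then []
  else
    let n := cs.length
    let cipher_words := (PySem.Chars.split₀ cs).countP (fun w => w.any PySem.Chars.isalpha)
    let r := quotes_list.foldl (fsmStepB cs n cipher_words) ([], [], [])
    if r.1 ≠ [] then r.1
    else if strict = true ∧ r.2.1 ≠ [] then r.2.1
    else r.2.2.take 10

-- ===== PRECONDITION & SPEC =====
def Spec_find_structure_matches (ciphertext : String) (quotes_list : List String) (strict : Bool) (out : List String) : Prop := out = find_structure_matches_alt ciphertext quotes_list strict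
instance (ciphertext : String) (quotes_list : List String) (strict : Bool) (out : List String) : Decidable (Spec_find_structure_matches ciphertext quotes_list strict out) := by unfold Spec_find_structure_matches; infer_instance

-- ===== CLAIM (what is proved, stated in full; the proofs are below) =====
def Claim_equal_find_structure_matches : Prop := ∀ (ciphertext : String) (quotes_list : List String) (strict : Bool), Dom_find_structure_matches ciphertext quotes_list strict → Spec_find_structure_matches ciphertext quotes_list strict (find_structure_matches ciphertext quotes_list strict)

-- ===== LEMMAS AND PROOFS =====

-- per-quote selectors (proof-only): what each loop contributes for one quote
def selE (ct : List Char) (quote : String) : List String :=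
  let q := PySem.Chars.upper quote.toList
  if q.length = ct.length ∧ fsmDiffCount q ct = 0 then [String.ofList q] else []

def selF (ct : List Char) (quote : String) : List String :=
  let q := PySem.Chars.upper quote.toList
  if q.length = ct.length ∧ fsmDiffCount q ct ≠ 0 ∧ fsmDiffCount q ct ≤ 3 then [String.ofList q] else []

def selG (ct : List Char) (cw : Nat) (quote : String) : List String :=
  let q := PySem.Chars.upper quote.toList
  if |(q.length : Int) - (ct.length : Int)| ≤ 5 ∧
      |(cw : Int) - (((PySem.Chars.split₀ q).countP (fun w => w.any PySem.Chars.isalpha) : Nat) : Int)| ≤ 1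
  then [String.ofList q] else []

theorem X_isalpha : PySem.Chars.isalpha 'X' = true := by decide

theorem charDiff (x y : Char) :
    ((if PySem.Chars.isalpha x then 'X' else x) != (if PySem.Chars.isalpha y then 'X' else y)) =
      !((PySem.Chars.isalpha x && PySem.Chars.isalpha y) || x == y) := by
  by_cases hx : PySem.Chars.isalpha x = true <;> by_cases hy : PySem.Chars.isalpha y = true
  · simp [hx, hy]
  · have hyX : ('X' == y) = false := by
      refine beq_eq_false_iff_ne.2 (fun h => hy ?_); rw [← h]; exact X_isalpha
    have hxy : (x == y) = false := beq_eq_false_iff_ne.2 (fun h => hy (h ▸ hx))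
    simp [hx, hy, bne, hyX, hxy]
  · have hXy : (x == 'X') = false := by
      refine beq_eq_false_iff_ne.2 (fun h => hx ?_); rw [h]; exact X_isalpha
    have hxy : (x == y) = false := beq_eq_false_iff_ne.2 (fun h => hx (h ▸ hy))
    simp [hx, hy, bne, hXy, hxy]
  · simp [hx, hy, bne]

theorem countDiff_eq (a b : List Char) :
    ((create_structure_mask a).zip (create_structure_mask b)).countP (fun p => p.1 != p.2) =
      fsmDiffCount a b := by
  unfold create_structure_mask fsmDiffCount
  rw [List.zip_map, List.countP_map]
  refine List.countP_congr (fun p _ => ?_)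
  obtain ⟨u, v⟩ := p
  simp only [Function.comp_apply, Prod.map_apply]
  rw [charDiff]

theorem mask_eq_iff (a b : List Char) (h : a.length = b.length) :
    create_structure_mask a = create_structure_mask b ↔ fsmDiffCount a b = 0 := by
  induction a generalizing b with
  | nil =>
    cases b with
    | nil => simp [create_structure_mask, fsmDiffCount]
    | cons y b' => simp at h
  | cons x a' ih =>
    cases b with
    | nil => simp at h
    | cons y b' =>
      have h' : a'.length = b'.length := by simpa using h
      have hca : create_structure_mask (x :: a') =
          (if PySem.Chars.isalpha x then 'X' else x) :: create_structure_mask a' := rfl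
      have hcb : create_structure_mask (y :: b') =
          (if PySem.Chars.isalpha y then 'X' else y) :: create_structure_mask b' := rfl
      have hd : fsmDiffCount (x :: a') (y :: b') =
          fsmDiffCount a' b' +
            (if !((PySem.Chars.isalpha x && PySem.Chars.isalpha y) || x == y) then 1 else 0) := by
        simp [fsmDiffCount, List.countP_cons]
      rw [hca, hcb, hd, List.cons_eq_cons, ih b' h']
      have hc := charDiff x y
      by_cases hp : ((PySem.Chars.isalpha x && PySem.Chars.isalpha y) || x == y) = true
      · have heq : (if PySem.Chars.isalpha x then 'X' else x) = (if PySem.Chars.isalpha y then 'X' else y) := by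
          rw [hp] at hc; simpa [bne_iff_ne] using hc
        simp [heq, hp]
      · have hpf : ((PySem.Chars.isalpha x && PySem.Chars.isalpha y) || x == y) = false :=
          Bool.eq_false_iff.2 hp
        have hne : (if PySem.Chars.isalpha x then 'X' else x) ≠ (if PySem.Chars.isalpha y then 'X' else y) := by
          rw [hpf] at hc; simpa [bne_iff_ne] using hc
        simp [hne, hpf]

theorem mask_length (a : List Char) : (create_structure_mask a).length = a.length := by
  simp [create_structure_mask]

theorem stepA_eq (ct : List Char) (strict : Bool) (acc : List String × List String) (quote : String) :
    fsmStepA (create_structure_mask ct) ct.length strict acc quote =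
      (acc.1 ++ selE ct quote, acc.2 ++ selF ct quote) := by
  unfold fsmStepA selE selF
  set q := PySem.Chars.upper quote.toList with hq
  by_cases hL : q.length = ct.length
  · have hskip : ¬ ((if strict then (0 : Int) else 3) < |(q.length : Int) - (ct.length : Int)|) := by
      rw [hL]; cases strict <;> simp
    rw [if_neg hskip]
    simp only [mask_length, hL, if_pos rfl]
    rw [countDiff_eq]
    by_cases hm : create_structure_mask q = create_structure_mask ct
    · have h0 : fsmDiffCount q ct = 0 := (mask_eq_iff q ct hL).1 hm
      simp [hm, hL, h0]
    · have h0 : fsmDiffCount q ct ≠ 0 := fun h => hm ((mask_eq_iff q ct hL).2 h)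
      by_cases h3 : fsmDiffCount q ct ≤ 3 <;> simp [hm, hL, h0, h3]
  · have hsel : (if q.length = ct.length ∧ fsmDiffCount q ct = 0 then [String.ofList q] else []) = ([] : List String) := by
      simp [hL]
    have hself : (if q.length = ct.length ∧ fsmDiffCount q ct ≠ 0 ∧ fsmDiffCount q ct ≤ 3 then [String.ofList q] else []) = ([] : List String) := by
      simp [hL]
    rw [hsel, hself]
    by_cases hskip : (if strict then (0 : Int) else 3) < |(q.length : Int) - (ct.length : Int)|
    · simp [hskip]
    · have hml : ¬ ((create_structure_mask q).length = (create_structure_mask ct).length) := by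
        simpa [mask_length] using hL
      simp [hskip, hml]

theorem stepFreq_eq (ct : List Char) (acc : List String) (quote : String) :
    fsmStepFreq ct ct.length acc quote =
      acc ++ selG ct ((PySem.Chars.split₀ ct).countP (fun w => w.any PySem.Chars.isalpha)) quote := by
  unfold fsmStepFreq selG
  simp only [List.countP_eq_length_filter]
  set q := PySem.Chars.upper quote.toList with hq
  set cwl := ((PySem.Chars.split₀ ct).filter (fun w => w.any PySem.Chars.isalpha)).length with hcwl
  set qwl := ((PySem.Chars.split₀ q).filter (fun w => w.any PySem.Chars.isalpha)).length with hqwl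
  by_cases h5 : |(q.length : Int) - (ct.length : Int)| ≤ 5
  · rw [if_neg (not_lt.2 h5)]
    by_cases h1 : |(cwl : Int) - (qwl : Int)| ≤ 1 <;> simp [h1, h5]
  · rw [if_pos (not_le.1 h5)]
    simp [h5]

theorem stepB_eq (ct : List Char) (acc : List String × List String × List String) (quote : String) :
    fsmStepB ct ct.length ((PySem.Chars.split₀ ct).countP (fun w => w.any PySem.Chars.isalpha)) acc quote =
      (acc.1 ++ selE ct quote, acc.2.1 ++ selF ct quote, acc.2.2 ++ selG ct ((PySem.Chars.split₀ ct).countP (fun w => w.any PySem.Chars.isalpha)) quote) := by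
  unfold fsmStepB selE selF selG
  set q := PySem.Chars.upper quote.toList with hq
  set cw := (PySem.Chars.split₀ ct).countP (fun w => w.any PySem.Chars.isalpha) with hcw
  by_cases hL : q.length = ct.length <;>
    by_cases h5 : |(q.length : Int) - (ct.length : Int)| ≤ 5 <;>
    by_cases h1 : |(cw : Int) - ((((PySem.Chars.split₀ q).countP (fun w => w.any PySem.Chars.isalpha)) : Nat) : Int)| ≤ 1
  all_goals (
    by_cases h0 : fsmDiffCount q ct = 0
    · simp [hL, h5, h1, h0]
    · by_cases h3 : fsmDiffCount q ct ≤ 3 <;> simp [hL, h5, h1, h0, h3])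

theorem foldl_pair (e f : String → List String) (l : List String) (a b : List String) :
    l.foldl (fun acc x => (acc.1 ++ e x, acc.2 ++ f x)) (a, b) = (a ++ l.flatMap e, b ++ l.flatMap f) := by
  induction l generalizing a b with
  | nil => simp
  | cons x t ih => simp [List.foldl_cons, ih, List.flatMap_cons]

theorem foldl_triple (e f g : String → List String) (l : List String) (a b c : List String) :
    l.foldl (fun acc x => (acc.1 ++ e x, acc.2.1 ++ f x, acc.2.2 ++ g x)) (a, b, c) =
      (a ++ l.flatMap e, b ++ l.flatMap f, c ++ l.flatMap g) := by
  induction l generalizing a b c with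
  | nil => simp
  | cons x t ih => simp [List.foldl_cons, ih, List.flatMap_cons]

-- ===== VERDICT (by name: the statement is the Claim_ definition above) =====
theorem find_structure_matches_spec : Claim_equal_find_structure_matches := by
  intro ciphertext quotes_list strict _
  unfold Spec_find_structure_matches find_structure_matches find_structure_matches_alt
  set cs := ciphertext.toList with hcs
  by_cases hstrip : PySem.Chars.strip cs = []
  · simp [hstrip]
  · simp only [if_neg hstrip]
    set cw := (PySem.Chars.split₀ cs).countP (fun w => w.any PySem.Chars.isalpha) with hcw
    have hA : quotes_list.foldl (fsmStepA (create_structure_mask cs) cs.length strict) ([], []) =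
        (quotes_list.flatMap (selE cs), quotes_list.flatMap (selF cs)) := by
      rw [show fsmStepA (create_structure_mask cs) cs.length strict =
            (fun acc x => (acc.1 ++ selE cs x, acc.2 ++ selF cs x)) from
          funext fun acc => funext fun q => stepA_eq cs strict acc q]
      simpa using foldl_pair (selE cs) (selF cs) quotes_list [] []
    have hFr : quotes_list.foldl (fsmStepFreq cs cs.length) [] =
        quotes_list.flatMap (selG cs cw) := by
      rw [show fsmStepFreq cs cs.length = (fun acc x => acc ++ selG cs cw x) from
          funext fun acc => funext fun q => stepFreq_eq cs acc q]
      simpa using PySem.List.foldl_append_eq_flatMap (selG cs cw) quotes_list ([] : List String)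
    have hB : quotes_list.foldl (fsmStepB cs cs.length cw) ([], [], []) =
        (quotes_list.flatMap (selE cs), quotes_list.flatMap (selF cs), quotes_list.flatMap (selG cs cw)) := by
      rw [show fsmStepB cs cs.length cw =
            (fun acc x => (acc.1 ++ selE cs x, acc.2.1 ++ selF cs x, acc.2.2 ++ selG cs cw x)) from
          funext fun acc => funext fun q => stepB_eq cs acc q]
      simpa using foldl_triple (selE cs) (selF cs) (selG cs cw) quotes_list [] [] []
    rw [hA, hFr, hB]
    set E := quotes_list.flatMap (selE cs)
    set F := quotes_list.flatMap (selF cs)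
    by_cases hE : E ≠ []
    · simp [hE]
    · simp only [hE]
      push_neg at hE
      by_cases hSF : strict = true ∧ F ≠ []
      · simp [hSF]
      · have hcond : (E = [] ∧ F = []) ∨ strict = false := by
          rcases Decidable.not_and_iff_or_not.1 hSF with h | h
          · right; simpa using h
          · left; exact ⟨hE, not_not.1 h⟩
        simp [hE, hSF]
        intro hF hs
        exact absurd ⟨hs, hF⟩ hSF
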